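-- pv_equiv track=rewrite | github.com/SreeragShibu/Languages | redgame.py | num_operation
-- ===== SOURCE A (Python) =====
-- def num_operation(arr,k):
--     arr.sort()
--     sum=0
--     if(len(arr)>2):
--         for i in range(len(arr)-1):
--             if(arr[i]>k):
--                 val=k
--             else:
--                 val=arr[i]
--             sum+=val
--         sum+=arr[len(arr)-1]
--     else:
--         max_val=max(arr)
--         min_val=min(arr)
--         val=0
--         if(min_val>k):
--             sum+=k
--             val=k
--         else:
--             sum+=min_val
--
--         sum+=max_val-val
--
--
--
--     return sum
-- ===== SOURCE B (Python) =====
-- def num_operation(arr, k):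
--     # Return-value equivalent to A; B does not sort arr in place (A does).
--     m = max(arr)
--     if len(arr) > 2:
--         return sum(min(x, k) for x in arr) - min(m, k) + m
--     mn = min(arr)
--     return m if mn > k else mn + m
-- ===== Notes on version B (the rewrite author's own statement) =====
-- stated objective: faster
-- what changed: Replaces A's in-place sort plus indexed loop with a single linear pass: max(arr) + sum of min(x,k) over all elements minus min(max,k), keeping the len<=2 branch; Pre_ excludes the empty list, on which A raises ValueError (max of empty sequence) and B raises too.
import Mathlib
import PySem

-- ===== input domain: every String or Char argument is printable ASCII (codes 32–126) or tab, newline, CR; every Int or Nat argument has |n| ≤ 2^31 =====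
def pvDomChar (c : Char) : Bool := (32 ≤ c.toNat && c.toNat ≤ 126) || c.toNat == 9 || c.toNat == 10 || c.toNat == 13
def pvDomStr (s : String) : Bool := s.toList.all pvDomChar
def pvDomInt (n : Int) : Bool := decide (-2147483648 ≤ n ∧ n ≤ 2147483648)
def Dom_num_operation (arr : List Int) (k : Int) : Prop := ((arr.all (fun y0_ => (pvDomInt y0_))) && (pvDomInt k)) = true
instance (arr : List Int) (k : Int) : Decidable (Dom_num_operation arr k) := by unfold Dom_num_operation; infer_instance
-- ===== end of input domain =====

-- B replaces A's sort-then-loop with one linear pass (max + Σ min(x,k) − min(max,k));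
-- equivalence is about the RETURN value only: A sorts arr in place, B does not mutate it.

-- ===== PORT A =====
def num_operation (arr : List Int) (k : Int) : Int :=
  let s := PySem.List.sorted arr (fun x => x)
  if PySem.List.len s > 2 then
    let sum := (PySem.List.pyRange 0 (PySem.List.len s - 1)).foldl
      (fun acc i =>
        let v := if PySem.List.pyGetD s i 0 > k then k else PySem.List.pyGetD s i 0
        acc + v) 0
    sum + PySem.List.pyGetD s (PySem.List.len s - 1) 0
  else
    let max_val := (PySem.List.max? s (fun x => x)).getD 0
    let min_val := (PySem.List.min? s (fun x => x)).getD 0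
    if min_val > k then (0 + k) + (max_val - k) else (0 + min_val) + (max_val - 0)

-- ===== PORT B =====
def num_operation_alt (arr : List Int) (k : Int) : Int :=
  let m := (PySem.List.max? arr (fun x => x)).getD 0
  if PySem.List.len arr > 2 then
    arr.foldl (fun acc x => acc + min x k) 0 - min m k + m
  else
    let mn := (PySem.List.min? arr (fun x => x)).getD 0
    if mn > k then m else mn + m

-- ===== PRECONDITION & SPEC =====
-- Pre_ excludes the empty list, on which Python A raises ValueError (max of empty sequence).
def Pre_num_operation (arr : List Int) (k : Int) : Prop := arr ≠ []
instance (arr : List Int) (k : Int) : Decidable (Pre_num_operation arr k) := by unfold Pre_num_operation; infer_instance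
def pvWitness_num_operation : List Int × Int := ([3, 1, 2], 2)

def Spec_num_operation (arr : List Int) (k : Int) (out : Int) : Prop := out = num_operation_alt arr k
instance (arr : List Int) (k : Int) (out : Int) : Decidable (Spec_num_operation arr k out) := by unfold Spec_num_operation; infer_instance

-- ===== CLAIM (what is proved, stated in full; the proofs are below) =====
def Claim_equal_num_operation : Prop := ∀ (arr : List Int) (k : Int), Dom_num_operation arr k → Pre_num_operation arr k → Spec_num_operation arr k (num_operation arr k)

-- ===== LEMMAS AND PROOFS =====

-- the capping branch is min
lemma pv_cap_eq (v k : Int) : (if v > k then k else v) = min v k := by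
  split <;> omega

-- max?/min? (with identity key) of a nonempty list: membership + extremality
lemma pv_max_spec (l : List Int) (h : l ≠ []) :
    (PySem.List.max? l (fun x => x)).getD 0 ∈ l ∧
      ∀ y ∈ l, y ≤ (PySem.List.max? l (fun x => x)).getD 0 := by
  cases hm : PySem.List.max? l (fun x => x) with
  | none => exact absurd ((PySem.List.max?_eq_none_iff l _).mp hm) h
  | some m =>
    simp only [Option.getD_some]
    exact ⟨PySem.List.max?_mem hm, fun y hy => PySem.List.max?_isMax hm y hy⟩

lemma pv_min_spec (l : List Int) (h : l ≠ []) :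
    (PySem.List.min? l (fun x => x)).getD 0 ∈ l ∧
      ∀ y ∈ l, (PySem.List.min? l (fun x => x)).getD 0 ≤ y := by
  cases hm : PySem.List.min? l (fun x => x) with
  | none =>
    exact absurd ((PySem.List.min?_eq_none_iff l _).mp hm) h
  | some m =>
    simp only [Option.getD_some]
    exact ⟨PySem.List.min?_mem hm, fun y hy => PySem.List.min?_isMin hm y hy⟩

-- max?/min? value is invariant under permutation
lemma pv_max_perm (l₁ l₂ : List Int) (hp : l₁.Perm l₂) (h : l₁ ≠ []) :
    (PySem.List.max? l₁ (fun x => x)).getD 0 = (PySem.List.max? l₂ (fun x => x)).getD 0 := by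
  have h₂ : l₂ ≠ [] := fun he => h (by have := hp.length_eq; rw [he] at this; exact List.eq_nil_of_length_eq_zero this)
  obtain ⟨hm₁, hx₁⟩ := pv_max_spec l₁ h
  obtain ⟨hm₂, hx₂⟩ := pv_max_spec l₂ h₂
  exact le_antisymm (hx₂ _ (hp.mem_iff.mp hm₁)) (hx₁ _ (hp.mem_iff.mpr hm₂))

lemma pv_min_perm (l₁ l₂ : List Int) (hp : l₁.Perm l₂) (h : l₁ ≠ []) :
    (PySem.List.min? l₁ (fun x => x)).getD 0 = (PySem.List.min? l₂ (fun x => x)).getD 0 := by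
  have h₂ : l₂ ≠ [] := fun he => h (by have := hp.length_eq; rw [he] at this; exact List.eq_nil_of_length_eq_zero this)
  obtain ⟨hm₁, hx₁⟩ := pv_min_spec l₁ h
  obtain ⟨hm₂, hx₂⟩ := pv_min_spec l₂ h₂
  exact le_antisymm (hx₁ _ (hp.mem_iff.mpr hm₂)) (hx₂ _ (hp.mem_iff.mp hm₁))

-- capped sum as a foldl is the capped sum as a mapped sum
lemma pv_fold_sum (l : List Int) (k : Int) :
    l.foldl (fun acc x => acc + min x k) 0 = (l.map (fun x => min x k)).sum := by
  simpa using PySem.List.foldl_add l (fun x => min x k) 0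

-- the last element of sorted(arr) is max(arr)
lemma pv_last_sorted_max (arr : List Int) (h : arr ≠ [])
    (n' : Nat) (hn : n' + 1 = (PySem.List.sorted arr (fun x => x)).length) :
    (PySem.List.sorted arr (fun x => x))[n']'(by omega) =
      (PySem.List.max? arr (fun x => x)).getD 0 := by
  set s := PySem.List.sorted arr (fun x => x) with hs
  have hperm : s.Perm arr := PySem.List.sorted_perm arr _ _
  have hsne : s ≠ [] := by
    intro he; rw [he] at hn; simp at hn
  have hpw : s.Pairwise (fun a b => a ≤ b) := by
    simpa using PySem.List.sorted_pairwise arr (fun x => x)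
  have hlastmax : ∀ y ∈ s, y ≤ s[n']'(by omega) := by
    intro y hy
    obtain ⟨p, hp, hpy⟩ := List.mem_iff_getElem.mp hy
    rcases Nat.lt_or_ge p n' with hlt | hge
    · have := List.pairwise_iff_getElem.mp hpw p n' (by omega) (by omega) hlt
      omega
    · have : p = n' := by omega
      subst this; omega
  obtain ⟨hm, hx⟩ := pv_max_spec arr h
  exact le_antisymm
    (hx _ (hperm.mem_iff.mp (List.getElem_mem _)))
    (hlastmax _ (hperm.mem_iff.mpr hm))

-- ===== VERDICT (by name: the statement is the Claim_ definition above) =====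
theorem num_operation_spec : Claim_equal_num_operation := by
  intro arr k _ hpre
  unfold Spec_num_operation num_operation num_operation_alt
  set s := PySem.List.sorted arr (fun x => x) with hs
  have hperm : s.Perm arr := PySem.List.sorted_perm arr _ _
  have hlen : s.length = arr.length := PySem.List.length_sorted arr _ _
  have hsne : s ≠ [] := fun he => hpre (by have := hperm.length_eq; rw [he] at this; exact List.eq_nil_of_length_eq_zero this.symm)
  have hmax : (PySem.List.max? s (fun x => x)).getD 0
      = (PySem.List.max? arr (fun x => x)).getD 0 := pv_max_perm s arr hperm hsne
  have hmin : (PySem.List.min? s (fun x => x)).getD 0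
      = (PySem.List.min? arr (fun x => x)).getD 0 := pv_min_perm s arr hperm hsne
  simp only [PySem.List.len_eq, hlen]
  by_cases hbig : (2 : Int) < (arr.length : Int)
  · -- len > 2 branch
    simp only [hbig, gt_iff_lt, if_pos]
    -- name n' = length - 1
    obtain ⟨n', hn⟩ : ∃ n', n' + 1 = s.length := ⟨s.length - 1, by omega⟩
    have hcast : (arr.length : Int) - 1 = (n' : Int) := by
      push_cast [← hlen, ← hn]; ring
    rw [hcast]
    -- split off the last index of the full range
    have hsplit : PySem.List.pyRange 0 ((n' : Int) + 1)
        = PySem.List.pyRange 0 (n' : Int) ++ [(n' : Int)] :=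
      PySem.List.pyRange_one_succ_right (by positivity)
    have hfull := PySem.List.foldl_pyRange_zero_pyGetD' s 0 (fun acc x => acc + min x k) 0
    have hrange : ((s.length : Nat) : Int) = (n' : Int) + 1 := by omega
    rw [hrange, hsplit, List.foldl_append] at hfull
    -- the loop body is min
    have hbody : (fun (acc : Int) (i : Int) =>
        acc + (if PySem.List.pyGetD s i 0 > k then k else PySem.List.pyGetD s i 0))
        = fun acc i => acc + min (PySem.List.pyGetD s i 0) k := by
      funext acc i; rw [pv_cap_eq]
    simp only [hbody]
    -- the last element
    have hlast : PySem.List.pyGetD s (n' : Int) 0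
        = (PySem.List.max? arr (fun x => x)).getD 0 := by
      rw [PySem.List.pyGetD_natCast, List.getD_eq_getElem?_getD,
        List.getElem?_eq_getElem (by omega), Option.getD_some]
      exact pv_last_sorted_max arr hpre n' hn
    simp only [List.foldl] at hfull
    -- capped sums over s and arr agree (permutation)
    have hsum : s.foldl (fun acc x => acc + min x k) 0
        = arr.foldl (fun acc x => acc + min x k) 0 := by
      rw [pv_fold_sum, pv_fold_sum]
      exact (hperm.map (fun x => min x k)).sum_eq
    rw [hlast] at hfull ⊢
    omega
  · -- len ≤ 2 branch
    simp only [hbig, gt_iff_lt, if_neg, not_false_iff]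
    rw [hmax, hmin]
    split <;> ring
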